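-- pv_equiv track=rewrite | github.com/DCJJ-Jasper/MedtricsAutoScheduling | SolverUtil.py | doubleSchedule
-- ===== SOURCE A (Python) =====
-- def doubleSchedule(currentSchedule, prefilledSchedule):
--     """
--     Double the current Schedule to allow for more detailed resolution. Remove ambiguity using the prefilledSchedule
--     E.g: [1, 2, 3] -> [1, 1, 2, 2, 3, 3]
--     :param currentSchedule: The current schedule that needs to be doubled
--     :param prefilledSchedule: The pre-filled schedule to provide more information about what to fill in
--     :return: doubled_schedule: The doubled schedule that allows for more detailed resolution
--     """
--     num_trainee = len(currentSchedule)
--     num_block = len(currentSchedule[0])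
--     doubled_schedule = [[] for i in range(num_trainee)]
--
--     for trainee in range(num_trainee):
--         for block in range(num_block):
--             if currentSchedule[trainee][block] == -3:
--                 # Ambiguous block, refer back to prefilledSchedule
--                 doubled_schedule[trainee].append(prefilledSchedule[trainee][2*block])
--                 doubled_schedule[trainee].append(prefilledSchedule[trainee][2*block+1])
--             else:
--                 # Simple block, just double it
--                 doubled_schedule[trainee].append(currentSchedule[trainee][block])
--                 doubled_schedule[trainee].append(currentSchedule[trainee][block])
--
--     return doubled_schedule
-- ===== SOURCE B (Python) =====
-- def doubleSchedule(currentSchedule, prefilledSchedule):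
--     """Build-then-patch: double every entry of each row, then overwrite the
--     positions of ambiguous (-3) blocks from prefilledSchedule."""
--     num_block = len(currentSchedule[0])
--     doubled = [[v for x in row[:num_block] for v in (x, x)] for row in currentSchedule]
--     for trainee in range(len(currentSchedule)):
--         for block in range(num_block):
--             if currentSchedule[trainee][block] == -3:
--                 doubled[trainee][2 * block] = prefilledSchedule[trainee][2 * block]
--                 doubled[trainee][2 * block + 1] = prefilledSchedule[trainee][2 * block + 1]
--     return doubled
-- ===== Notes on version B (the rewrite author's own statement) =====
-- stated objective: alternative
-- what changed: Replaces the single fused conditional append loop by two differently-shaped passes: a comprehension that doubles every entry of each row, then a patch pass that overwrites the two slots of each ambiguous (-3) block from prefilledSchedule.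
import Mathlib
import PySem

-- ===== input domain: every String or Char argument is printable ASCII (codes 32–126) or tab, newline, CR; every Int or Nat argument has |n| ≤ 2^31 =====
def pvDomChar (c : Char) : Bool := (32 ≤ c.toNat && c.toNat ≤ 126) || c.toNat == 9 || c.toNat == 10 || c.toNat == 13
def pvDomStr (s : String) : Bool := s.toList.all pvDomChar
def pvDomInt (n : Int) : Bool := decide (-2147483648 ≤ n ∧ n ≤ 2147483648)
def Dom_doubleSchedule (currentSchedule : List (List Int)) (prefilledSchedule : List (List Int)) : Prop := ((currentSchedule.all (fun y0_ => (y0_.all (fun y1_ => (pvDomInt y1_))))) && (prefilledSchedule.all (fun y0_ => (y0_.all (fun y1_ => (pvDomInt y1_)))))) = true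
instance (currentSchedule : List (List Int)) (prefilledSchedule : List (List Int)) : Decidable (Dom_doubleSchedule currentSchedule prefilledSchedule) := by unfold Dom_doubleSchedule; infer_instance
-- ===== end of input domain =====

-- B replaces A's single fused conditional-append loop by a build-then-patch decomposition
-- (double every entry, then overwrite the slots of ambiguous blocks); alternative, not faster.

-- ===== PORT A =====
-- Literal port of Source A: nested index loops appending two values per block.
-- All Python indexing here uses non-negative in-range indices under Pre_, so List.getD is exact.
def doubleSchedule (currentSchedule : List (List Int)) (prefilledSchedule : List (List Int)) : List (List Int) :=
  let num_trainee := currentSchedule.length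
  let num_block := (currentSchedule.headD []).length
  (List.range num_trainee).map (fun trainee =>
    (List.range num_block).foldl (fun row block =>
      if (currentSchedule.getD trainee []).getD block 0 = -3 then
        (row ++ [(prefilledSchedule.getD trainee []).getD (2*block) 0]) ++
          [(prefilledSchedule.getD trainee []).getD (2*block+1) 0]
      else
        (row ++ [(currentSchedule.getD trainee []).getD block 0]) ++
          [(currentSchedule.getD trainee []).getD block 0]) [])

-- ===== PORT B =====
-- Literal port of Source B: build the fully doubled schedule, then patch ambiguous blocks in place.
def doubleSchedule_alt (currentSchedule : List (List Int)) (prefilledSchedule : List (List Int)) : List (List Int) :=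
  let num_block := (currentSchedule.headD []).length
  let doubled := currentSchedule.map (fun row =>
    (PySem.List.slice row none (some (num_block : Int))).flatMap (fun x => [x, x]))
  (List.range currentSchedule.length).foldl (fun d trainee =>
    d.set trainee ((List.range num_block).foldl (fun dr block =>
      if (currentSchedule.getD trainee []).getD block 0 = -3 then
        (dr.set (2*block) ((prefilledSchedule.getD trainee []).getD (2*block) 0)).set (2*block+1)
          ((prefilledSchedule.getD trainee []).getD (2*block+1) 0)
      else dr) (d.getD trainee []))) doubled

-- ===== PRECONDITION & SPEC =====
-- Pre_ = exactly the inputs where Python A returns: a non-empty currentSchedule, every row at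
-- least as long as the first row, and wherever an ambiguous (-3) entry occurs the prefilled row
-- exists and reaches both doubled positions.
def Pre_doubleSchedule (currentSchedule : List (List Int)) (prefilledSchedule : List (List Int)) : Prop :=
  currentSchedule ≠ [] ∧
  ∀ t, t < currentSchedule.length →
    (currentSchedule.headD []).length ≤ (currentSchedule.getD t []).length ∧
    ∀ b, b < (currentSchedule.headD []).length →
      (currentSchedule.getD t []).getD b 0 = -3 →
      t < prefilledSchedule.length ∧ 2*b+1 < (prefilledSchedule.getD t []).length
instance (currentSchedule : List (List Int)) (prefilledSchedule : List (List Int)) : Decidable (Pre_doubleSchedule currentSchedule prefilledSchedule) := by unfold Pre_doubleSchedule; infer_instance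

def pvWitness_doubleSchedule : List (List Int) × List (List Int) := ([[1, -3]], [[5, 6, 7, 8]])

def Spec_doubleSchedule (currentSchedule : List (List Int)) (prefilledSchedule : List (List Int)) (out : List (List Int)) : Prop := out = doubleSchedule_alt currentSchedule prefilledSchedule
instance (currentSchedule : List (List Int)) (prefilledSchedule : List (List Int)) (out : List (List Int)) : Decidable (Spec_doubleSchedule currentSchedule prefilledSchedule out) := by unfold Spec_doubleSchedule; infer_instance

-- ===== CLAIM (what is proved, stated in full; the proofs are below) =====
def Claim_equal_doubleSchedule : Prop := ∀ (currentSchedule : List (List Int)) (prefilledSchedule : List (List Int)), Dom_doubleSchedule currentSchedule prefilledSchedule → Pre_doubleSchedule currentSchedule prefilledSchedule → Spec_doubleSchedule currentSchedule prefilledSchedule (doubleSchedule currentSchedule prefilledSchedule)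

-- ===== LEMMAS AND PROOFS =====

-- the value both programs place for block b of a row
def pvBlk (c p : Nat → Int) (b : Nat) : List Int :=
  if c b = -3 then [p (2*b), p (2*b+1)] else [c b, c b]

-- the patch step of B, abstracted
def pvPatch (c p : Nat → Int) (dr : List Int) (b : Nat) : List Int :=
  if c b = -3 then (dr.set (2*b) (p (2*b))).set (2*b+1) (p (2*b+1)) else dr

lemma pvBlk_length (c p : Nat → Int) (b : Nat) : (pvBlk c p b).length = 2 := by
  unfold pvBlk; split_ifs <;> rfl

lemma pvPatch_length (c p : Nat → Int) (dr : List Int) (b : Nat) :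
    (pvPatch c p dr b).length = dr.length := by
  unfold pvPatch; split_ifs <;> simp

lemma pvPatch_foldl_length (c p : Nat → Int) (l : List Nat) (dr : List Int) :
    (l.foldl (pvPatch c p) dr).length = dr.length := by
  induction l generalizing dr with
  | nil => rfl
  | cons a l ih => simp [List.foldl_cons, ih, pvPatch_length]

lemma pvPatch_append (c p : Nat → Int) (b : Nat) (xs ys : List Int)
    (h : 2*b+1 < xs.length) :
    pvPatch c p (xs ++ ys) b = pvPatch c p xs b ++ ys := by
  unfold pvPatch
  split_ifs
  · rw [List.set_append_left _ _ (by omega), List.set_append_left _ _ (by simp; omega)]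
  · rfl

lemma pvPatch_foldl_append (c p : Nat → Int) (n : Nat) (xs ys : List Int)
    (h : ∀ b, b < n → 2*b+1 < xs.length) :
    (List.range n).foldl (pvPatch c p) (xs ++ ys) =
      (List.range n).foldl (pvPatch c p) xs ++ ys := by
  induction n with
  | zero => rfl
  | succ n ih =>
    have h' : ∀ b, b < n → 2*b+1 < xs.length := fun b hb => h b (by omega)
    have hlen : ((List.range n).foldl (pvPatch c p) xs).length = xs.length :=
      pvPatch_foldl_length c p _ xs
    rw [List.range_succ, List.foldl_append, List.foldl_append, ih h']
    simp only [List.foldl_cons, List.foldl_nil]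
    exact pvPatch_append c p n _ ys (by rw [hlen]; exact h n (by omega))

lemma pvBlk_flatMap_length (c p : Nat → Int) (l : List Nat) :
    (l.flatMap (pvBlk c p)).length = 2 * l.length := by
  induction l with
  | nil => rfl
  | cons a l ih =>
    rw [List.flatMap_cons, List.length_append, pvBlk_length, ih, List.length_cons]
    ring

lemma double_flatMap_length (c : Nat → Int) (l : List Nat) :
    (l.flatMap (fun b => [c b, c b])).length = 2 * l.length := by
  induction l with
  | nil => rfl
  | cons a l ih => simp [List.flatMap_cons, ih]; omega

lemma pvPatch_last (c p : Nat → Int) (n : Nat) (L : List Int) (hL : L.length = 2*n) :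
    pvPatch c p (L ++ [c n, c n]) n = L ++ pvBlk c p n := by
  unfold pvPatch pvBlk
  split_ifs
  · rw [List.set_append_right _ _ (by omega), List.set_append_right _ _ (by omega)]
    congr 1
    simp [hL]
  · rfl

-- the inner patch fold turns the doubled row into the per-block flatMap
lemma pvPatch_foldl_eq_flatMap (c p : Nat → Int) (n : Nat) :
    (List.range n).foldl (pvPatch c p) ((List.range n).flatMap (fun b => [c b, c b])) =
      (List.range n).flatMap (pvBlk c p) := by
  induction n with
  | zero => rfl
  | succ n ih =>
    have hlen : ((List.range n).flatMap (fun b => [c b, c b])).length = 2 * n := by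
      simpa using double_flatMap_length c (List.range n)
    have hLlen : ((List.range n).flatMap (pvBlk c p)).length = 2 * n := by
      simpa using pvBlk_flatMap_length c p (List.range n)
    rw [List.range_succ, List.foldl_append]
    have hbase : (List.range n ++ [n]).flatMap (fun b => [c b, c b]) =
        (List.range n).flatMap (fun b => [c b, c b]) ++ [c n, c n] := by
      simp [List.flatMap_append]
    rw [hbase, pvPatch_foldl_append c p n _ _ (by intro b hb; omega), ih]
    simp only [List.foldl_cons, List.foldl_nil, List.flatMap_append, List.flatMap_cons,
      List.flatMap_nil, List.append_nil]
    exact pvPatch_last c p n _ hLlen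

-- the first n entries of a long-enough row, as a range map
lemma take_eq_range_map (l : List Int) (n : Nat) (h : n ≤ l.length) :
    l.take n = (List.range n).map (fun b => l.getD b 0) := by
  apply List.ext_getElem
  · simp [h]
  · intro i h1 h2
    have hi : i < l.length := by simp at h1; omega
    simp [List.getElem?_eq_getElem hi]

-- A's per-row fold is the per-block flatMap
lemma rowA_eq_flatMap (c p : Nat → Int) (n : Nat) :
    (List.range n).foldl (fun row b =>
      if c b = -3 then (row ++ [p (2*b)]) ++ [p (2*b+1)] else (row ++ [c b]) ++ [c b]) [] =
      (List.range n).flatMap (pvBlk c p) := by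
  induction n with
  | zero => rfl
  | succ n ih =>
    rw [List.range_succ, List.foldl_append, List.flatMap_append, ih]
    simp only [List.foldl_cons, List.foldl_nil, List.flatMap_cons, List.flatMap_nil]
    unfold pvBlk
    split_ifs <;> simp

-- B's outer fold-with-set is a map over indices
lemma foldl_set_eq_map {α : Type} (g : Nat → α → α) (a0 : α) (d : List α) (k : Nat)
    (hk : k ≤ d.length) :
    (List.range k).foldl (fun acc t => acc.set t (g t (acc.getD t a0))) d =
      (List.range k).map (fun t => g t (d.getD t a0)) ++ d.drop k := by
  induction k with
  | zero => simp
  | succ k ih =>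
    have hk' : k ≤ d.length := by omega
    have hkd : k < d.length := by omega
    rw [List.range_succ, List.foldl_append, ih hk']
    simp only [List.foldl_cons, List.foldl_nil, List.map_append, List.map_cons, List.map_nil]
    have hmaplen : ((List.range k).map (fun t => g t (d.getD t a0))).length = k := by simp
    have hdrop : d.drop k = d[k] :: d.drop (k+1) := List.drop_eq_getElem_cons hkd
    have hget : ((List.range k).map (fun t => g t (d.getD t a0)) ++ d.drop k).getD k a0
        = d.getD k a0 := by
      rw [hdrop, List.getD_eq_getElem?_getD, List.getElem?_append_right (by simp)]
      simp
    rw [hget, List.set_append_right _ _ (by omega), hmaplen, Nat.sub_self, hdrop,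
        List.set_cons_zero]
    simp [List.getD_eq_getElem?_getD]

theorem doubleSchedule_eq (cs ps : List (List Int)) (hpre : Pre_doubleSchedule cs ps) :
    doubleSchedule cs ps = doubleSchedule_alt cs ps := by
  obtain ⟨-, hrows⟩ := hpre
  unfold doubleSchedule doubleSchedule_alt
  simp only []
  set n := (cs.headD []).length with hn
  set g : Nat → List Int → List Int := fun trainee dr =>
    (List.range n).foldl (fun dr block =>
      if (cs.getD trainee []).getD block 0 = -3 then
        (dr.set (2*block) ((ps.getD trainee []).getD (2*block) 0)).set (2*block+1)
          ((ps.getD trainee []).getD (2*block+1) 0)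
      else dr) dr with hg
  set doubled : List (List Int) := cs.map (fun row =>
    (PySem.List.slice row none (some (n : Int))).flatMap (fun x => [x, x])) with hdoubled
  have hdlen : doubled.length = cs.length := by simp [hdoubled]
  rw [show (List.range cs.length).foldl
        (fun d trainee => d.set trainee (g trainee (d.getD trainee []))) doubled
      = (List.range cs.length).map (fun t => g t (doubled.getD t [])) ++ doubled.drop cs.length by
    rw [← hdlen, foldl_set_eq_map g [] doubled doubled.length (by omega)]]
  rw [List.drop_eq_nil_of_le (by omega), List.append_nil]
  apply List.ext_getElem (by simp)
  intro t h1 h2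
  simp only [List.getElem_map, List.getElem_range]
  have ht : t < cs.length := by simpa using h1
  obtain ⟨hrowlen, -⟩ := hrows t ht
  set c : Nat → Int := fun b => (cs.getD t []).getD b 0 with hc
  set p : Nat → Int := fun b => (ps.getD t []).getD b 0 with hp
  have hbase : doubled.getD t [] = (List.range n).flatMap (fun b => [c b, c b]) := by
    rw [hdoubled, List.getD_eq_getElem _ [] (by simpa [hdoubled] using ht), List.getElem_map,
        PySem.List.slice_to_natCast]
    have hcs : (cs[t]'ht) = cs.getD t [] := (List.getD_eq_getElem cs [] ht).symm
    rw [hcs, take_eq_range_map _ n hrowlen, List.flatMap_map]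
  have hB : g t (doubled.getD t []) = (List.range n).flatMap (pvBlk c p) := by
    rw [hg, hbase]
    exact pvPatch_foldl_eq_flatMap c p n
  rw [hB]
  exact rowA_eq_flatMap c p n

-- ===== VERDICT (by name: the statement is the Claim_ definition above) =====
theorem doubleSchedule_spec : Claim_equal_doubleSchedule := by
  intro cs ps _ hpre
  unfold Spec_doubleSchedule
  exact doubleSchedule_eq cs ps hpre
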